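-- pv_equiv track=rewrite | github.com/parallelno/Vector06c | Vector06c_Dev/_Projects/GameNoname/temp/tests/smallDict.py | PairCount
-- ===== SOURCE A (Python) =====
-- def PairCount(pair, data):
-- 	count = 0
-- 	i = 1
-- 	p1, p2 = pair
-- 	while i < len(data):
-- 		pp1 = data[i-1]
-- 		pp2 = data[i]
-- 		if p1 == pp1 and p2 == pp2:
-- 			count += 1
-- 			i += 2
-- 		else:
-- 			i += 1
-- 	return count
-- ===== SOURCE B (Python) =====
-- def PairCount(pair, data):
--     p1, p2 = pair
--     # pass 1: every index i where (data[i-1], data[i]) matches the pair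
--     positions = [i for i in range(1, len(data)) if data[i - 1] == p1 and data[i] == p2]
--     # pass 2: greedy left-to-right selection of non-overlapping matches
--     count = 0
--     last = -1
--     for pos in positions:
--         if pos - 1 > last:
--             count += 1
--             last = pos
--     return count
-- ===== Notes on version B (the rewrite author's own statement) =====
-- stated objective: alternative
-- what changed: Replaces A's single interleaved skip-2 while loop with two passes: first collect all candidate match indices with a list comprehension, then greedily select non-overlapping ones with a 'last consumed index' accumulator.
import Mathlib
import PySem

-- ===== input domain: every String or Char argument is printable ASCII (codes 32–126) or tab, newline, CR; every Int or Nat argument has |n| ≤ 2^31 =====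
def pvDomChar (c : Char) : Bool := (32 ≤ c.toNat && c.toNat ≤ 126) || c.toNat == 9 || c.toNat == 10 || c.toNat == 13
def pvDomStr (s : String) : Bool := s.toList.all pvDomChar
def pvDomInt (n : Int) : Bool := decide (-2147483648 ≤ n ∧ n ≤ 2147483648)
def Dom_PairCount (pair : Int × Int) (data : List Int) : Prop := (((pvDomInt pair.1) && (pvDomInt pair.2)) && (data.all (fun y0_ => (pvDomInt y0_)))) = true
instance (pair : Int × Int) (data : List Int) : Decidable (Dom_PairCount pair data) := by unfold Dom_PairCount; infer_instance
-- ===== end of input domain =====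

-- B replaces A's single interleaved skip-2 while loop by two passes: collect all
-- candidate match indices, then greedily select the non-overlapping ones (objective: alternative).

-- ===== PORT A =====
-- A's while loop; i starts at 1 and only increases, so the indices i-1, i are
-- always in range (0 ≤ i-1 < i < len) and getD never uses its default.
def PairCountGo (p1 p2 : Int) (data : List Int) (i : Nat) (count : Int) : Int :=
  if h : i < data.length then
    if p1 = data.getD (i - 1) 0 ∧ p2 = data.getD i 0 then
      PairCountGo p1 p2 data (i + 2) (count + 1)
    else
      PairCountGo p1 p2 data (i + 1) count
  else count
termination_by data.length - i
decreasing_by all_goals omega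

def PairCount (pair : Int × Int) (data : List Int) : Int :=
  PairCountGo pair.1 pair.2 data 1 0

-- ===== PORT B =====
-- the comprehension's filter predicate: data[i-1] == p1 and data[i] == p2
def pvP (p1 p2 : Int) (data : List Int) (j : Nat) : Bool :=
  decide (data.getD (j - 1) 0 = p1) && decide (data.getD j 0 = p2)

-- one step of B's greedy for-loop, state = (count, last)
def pvStep (s : Int × Int) (pos : Nat) : Int × Int :=
  if (pos : Int) - 1 > s.2 then (s.1 + 1, (pos : Int)) else s

def PairCount_alt (pair : Int × Int) (data : List Int) : Int :=
  -- range(1, len(data)) = the naturals 1 .. len-1; indices used are in range, getD exact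
  let positions : List Nat :=
    ((List.range data.length).drop 1).filter (pvP pair.1 pair.2 data)
  (positions.foldl pvStep (0, -1)).1

-- ===== PRECONDITION & SPEC =====
def Spec_PairCount (pair : Int × Int) (data : List Int) (out : Int) : Prop := out = PairCount_alt pair data
instance (pair : Int × Int) (data : List Int) (out : Int) : Decidable (Spec_PairCount pair data out) := by unfold Spec_PairCount; infer_instance

-- ===== CLAIM (what is proved, stated in full; the proofs are below) =====
def Claim_equal_PairCount : Prop := ∀ (pair : Int × Int) (data : List Int), Dom_PairCount pair data → Spec_PairCount pair data (PairCount pair data)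

-- ===== LEMMAS AND PROOFS =====

-- greedy selection as structural recursion on the position list
def pvSel : List Nat → Int → Int
  | [], _ => 0
  | p :: ps, last => if (p : Int) - 1 > last then 1 + pvSel ps p else pvSel ps last

-- the candidate positions ≥ i
def pvPosFrom (p1 p2 : Int) (data : List Int) (i : Nat) : List Nat :=
  (List.range' i (data.length - i)).filter (pvP p1 p2 data)

theorem pvPosFrom_nil (p1 p2 : Int) (data : List Int) (i : Nat) (h : data.length ≤ i) :
    pvPosFrom p1 p2 data i = [] := by
  unfold pvPosFrom
  have : data.length - i = 0 := by omega
  simp [this]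

theorem pvPosFrom_step (p1 p2 : Int) (data : List Int) (i : Nat) (h : i < data.length) :
    pvPosFrom p1 p2 data i =
      if pvP p1 p2 data i then i :: pvPosFrom p1 p2 data (i + 1)
      else pvPosFrom p1 p2 data (i + 1) := by
  unfold pvPosFrom
  have h1 : data.length - i = (data.length - (i + 1)) + 1 := by omega
  rw [h1, List.range'_succ, List.filter_cons]

theorem pvPosFrom_ge (p1 p2 : Int) (data : List Int) (i : Nat) :
    ∀ p ∈ pvPosFrom p1 p2 data i, i ≤ p := by
  intro p hp
  unfold pvPosFrom at hp
  have := (List.mem_filter.mp hp).1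
  exact (List.mem_range'_1.mp this).1

theorem pvSel_congr (S : List Nat) (l l' : Int)
    (h : ∀ p ∈ S, l < (p : Int) - 1 ∧ l' < (p : Int) - 1) :
    pvSel S l = pvSel S l' := by
  cases S with
  | nil => rfl
  | cons p ps =>
    have hp := h p (List.mem_cons_self ..)
    rw [pvSel, pvSel, if_pos hp.1, if_pos hp.2]

-- skipping the head position i+1 when last = i
theorem pvSel_drop (p1 p2 : Int) (data : List Int) (i : Nat) :
    pvSel (pvPosFrom p1 p2 data (i + 1)) (i : Int) =
      pvSel (pvPosFrom p1 p2 data (i + 2)) (i : Int) := by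
  by_cases h : i + 1 < data.length
  · rw [pvPosFrom_step p1 p2 data (i + 1) h]
    split
    · show pvSel ((i + 1) :: _) _ = _
      rw [pvSel, if_neg (by push_cast; omega)]
    · rfl
  · rw [pvPosFrom_nil p1 p2 data (i + 1) (by omega),
        pvPosFrom_nil p1 p2 data (i + 2) (by omega)]

theorem pvGo_eq (p1 p2 : Int) (data : List Int) :
    ∀ n i count, data.length - i ≤ n → 1 ≤ i →
      PairCountGo p1 p2 data i count =
        count + pvSel (pvPosFrom p1 p2 data i) ((i : Int) - 2) := by
  intro n
  induction n with
  | zero =>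
    intro i count hn hi
    rw [PairCountGo]
    have hge : data.length ≤ i := by omega
    rw [dif_neg (by omega), pvPosFrom_nil p1 p2 data i hge]
    simp [pvSel]
  | succ n ih =>
    intro i count hn hi
    rw [PairCountGo]
    by_cases hlt : i < data.length
    · rw [dif_pos hlt, pvPosFrom_step p1 p2 data i hlt]
      by_cases hm : p1 = data.getD (i - 1) 0 ∧ p2 = data.getD i 0
      · have hP : pvP p1 p2 data i = true := by
          unfold pvP; rw [hm.1, hm.2]; simp
        rw [if_pos hm, hP, if_pos rfl]
        rw [ih (i + 2) (count + 1) (by omega) (by omega)]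
        have hc : ((i : Int) - 1 > (i : Int) - 2) := by omega
        rw [show pvSel (i :: pvPosFrom p1 p2 data (i + 1)) ((i : Int) - 2) =
              1 + pvSel (pvPosFrom p1 p2 data (i + 1)) (i : Int) by
            simp [pvSel, hc]]
        rw [pvSel_drop p1 p2 data i,
            show (((i + 2 : Nat)) : Int) - 2 = (i : Int) from by push_cast; ring]
        ring
      · have hP : pvP p1 p2 data i = false := by
          unfold pvP
          rcases not_and_or.mp hm with h1 | h1
          · simp only [Bool.and_eq_false_iff, decide_eq_false_iff_not]
            left; intro hc; exact h1 hc.symm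
          · simp only [Bool.and_eq_false_iff, decide_eq_false_iff_not]
            right; intro hc; exact h1 hc.symm
        rw [if_neg hm, hP]
        rw [show (if (false = true) then i :: pvPosFrom p1 p2 data (i + 1)
              else pvPosFrom p1 p2 data (i + 1)) = pvPosFrom p1 p2 data (i + 1) by simp]
        rw [ih (i + 1) count (by omega) (by omega)]
        congr 1
        apply pvSel_congr
        intro p hp
        have := pvPosFrom_ge p1 p2 data (i + 1) p hp
        refine ⟨?_, ?_⟩ <;> push_cast <;> omega
    · have hge : data.length ≤ i := by omega
      rw [dif_neg hlt, pvPosFrom_nil p1 p2 data i hge]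
      simp [pvSel]

theorem pvFoldl_sel (S : List Nat) (c l : Int) :
    (S.foldl pvStep (c, l)).1 = c + pvSel S l := by
  induction S generalizing c l with
  | nil => simp [pvSel]
  | cons p ps ih =>
    simp only [List.foldl_cons, pvStep, pvSel]
    split <;> rw [ih] <;> ring

theorem pvPositions_eq (p1 p2 : Int) (data : List Int) :
    ((List.range data.length).drop 1).filter (pvP p1 p2 data) =
      pvPosFrom p1 p2 data 1 := by
  unfold pvPosFrom
  rw [List.range_eq_range', List.drop_range']

-- ===== VERDICT (by name: the statement is the Claim_ definition above) =====
theorem PairCount_spec : Claim_equal_PairCount := by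
  intro pair data _
  show PairCount pair data = PairCount_alt pair data
  unfold PairCount PairCount_alt
  rw [pvFoldl_sel, pvPositions_eq,
      pvGo_eq pair.1 pair.2 data data.length 1 0 (by omega) (by omega)]
  norm_num
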